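-- pv_equiv track=rewrite | github.com/Mariusmivw/kettingwoorden | test.py | thingy
-- ===== SOURCE A (Python) =====
-- keyboard = {
--     "a": ["q", "w", "s", "z"],
--     "b": ["v", "g", "h", "n"],
--     "c": ["x", "d", "f", "v"],
--     "d": ["e", "r", "f", "c", "x", "s"],
--     "e": ["w", "s", "d", "r"],
--     "f": ["d", "r", "t", "g", "v", "c"],
--     "g": ["f", "t", "y", "h", "b", "v"],
--     "h": ["g", "y", "u", "j", "n", "b"],
--     "i": ["u", "j", "k", "o"],
--     "j": ["h", "u", "i", "k", "m", "n"],
--     "k": ["j", "i", "o", "l", "m"],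
--     "l": ["k", "o", "p"],
--     "m": ["n", "j", "k"],
--     "n": ["b", "h", "j", "m"],
--     "o": ["i", "k", "l", "p"],
--     "p": ["o", "l"],
--     "q": ["a", "w"],
--     "r": ["e", "d", "f", "t"],
--     "s": ["a", "w", "e", "d", "x", "z"],
--     "t": ["r", "f", "g", "y"],
--     "u": ["y", "h", "j", "i"],
--     "v": ["c", "f", "g", "b"],
--     "w": ["q", "a", "s", "e"],
--     "x": ["z", "s", "d", "c"],
--     "y": ["t", "g", "h", "u"],
--     "z": ["a", "s", "x"]
-- }
--
-- def thingy(char, str):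
--     str = str.replace(char, "")
--     try:
--         adj = keyboard[char]
--         for i in range(len(adj)):
--             if (adj[i] in str):
--                 str = thingy(adj[i], str)
--     except KeyError:
--         return str
--     return str
-- ===== SOURCE B (Python) =====
-- ADJACENT = {
--     "a": "qwsz", "b": "vghn", "c": "xdfv", "d": "erfcxs", "e": "wsdr",
--     "f": "drtgvc", "g": "ftyhbv", "h": "gyujnb", "i": "ujko", "j": "huikmn",
--     "k": "jiolm", "l": "kop", "m": "njk", "n": "bhjm", "o": "iklp", "p": "ol",
--     "q": "aw", "r": "edft", "s": "awedxz", "t": "rfgy", "u": "yhji",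
--     "v": "cfgb", "w": "qase", "x": "zsdc", "y": "tghu", "z": "asx"
-- }
--
-- def thingy(char, str):
--     # Iterative stack-based graph search over a compact char-adjacency table,
--     # then one filtering pass, instead of A's recursive replace-while-scanning.
--     tmp = str.replace(char, "")
--     if char not in ADJACENT:
--         return tmp
--     seen = {char}
--     stack = [char]
--     while stack:
--         u = stack.pop()
--         for v in ADJACENT[u]:
--             if v not in seen and v in tmp:
--                 seen.add(v)
--                 stack.append(v)
--     return "".join(c for c in tmp if c not in seen)
-- ===== Notes on version B (the rewrite author's own statement) =====
-- stated objective: alternative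
-- what changed: Replaces A's recursive replace-while-scanning DFS (which repeatedly rewrites the string during the traversal) by one iterative stack-based graph search over a compact char-adjacency table (neighbor strings instead of lists of one-letter strings) that builds the reachable letter set once, followed by a single filtering pass over the string.
import Mathlib
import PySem

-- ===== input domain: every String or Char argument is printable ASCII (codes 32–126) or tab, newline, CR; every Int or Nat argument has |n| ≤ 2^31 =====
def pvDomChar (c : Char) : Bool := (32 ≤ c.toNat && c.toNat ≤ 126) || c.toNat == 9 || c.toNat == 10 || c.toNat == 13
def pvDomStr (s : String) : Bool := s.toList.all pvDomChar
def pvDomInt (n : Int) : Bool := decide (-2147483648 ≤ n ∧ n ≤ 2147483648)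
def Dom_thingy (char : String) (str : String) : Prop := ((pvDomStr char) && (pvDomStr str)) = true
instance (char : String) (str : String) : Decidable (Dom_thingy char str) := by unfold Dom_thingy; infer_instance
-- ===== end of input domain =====

-- B replaces A's recursive replace-while-scanning DFS by one iterative stack search over a
-- compact char-adjacency table, building the reachable letter set, then a single filtering
-- pass (alternative algorithm, same value).

-- ===== PORT A =====
-- the module-level 'keyboard' dict of Source A
def keyboardA : PySem.Dict String (List String) := PySem.Dict.ofList [
  ("a", ["q", "w", "s", "z"]), ("b", ["v", "g", "h", "n"]), ("c", ["x", "d", "f", "v"]),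
  ("d", ["e", "r", "f", "c", "x", "s"]), ("e", ["w", "s", "d", "r"]), ("f", ["d", "r", "t", "g", "v", "c"]),
  ("g", ["f", "t", "y", "h", "b", "v"]), ("h", ["g", "y", "u", "j", "n", "b"]), ("i", ["u", "j", "k", "o"]),
  ("j", ["h", "u", "i", "k", "m", "n"]), ("k", ["j", "i", "o", "l", "m"]), ("l", ["k", "o", "p"]),
  ("m", ["n", "j", "k"]), ("n", ["b", "h", "j", "m"]), ("o", ["i", "k", "l", "p"]),
  ("p", ["o", "l"]), ("q", ["a", "w"]), ("r", ["e", "d", "f", "t"]),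
  ("s", ["a", "w", "e", "d", "x", "z"]), ("t", ["r", "f", "g", "y"]), ("u", ["y", "h", "j", "i"]),
  ("v", ["c", "f", "g", "b"]), ("w", ["q", "a", "s", "e"]), ("x", ["z", "s", "d", "c"]),
  ("y", ["t", "g", "h", "u"]), ("z", ["a", "s", "x"])]

-- A's general recursion, with a fuel counter as totality guard (the wrapper below passes
-- str.toList.length + 2, which the proof shows is always enough; Python's recursion is the
-- fuel+1 branch, step for step: replace, dict lookup (KeyError → none), index loop).
def thingyFuel : Nat → String → String → String
  | 0, _, s => s
  | fuel+1, char, s =>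
    let s1 := PySem.Str.replace s char ""
    match keyboardA.get? char with
    | none => s1
    | some adj =>
      (PySem.List.pyRange 0 (adj.length : Int) 1).foldl
        (fun cur i =>
          let a := PySem.List.pyGetD adj i ""
          if PySem.Str.isIn a cur then thingyFuel fuel a cur else cur) s1

def thingy (char : String) (str : String) : String :=
  thingyFuel (str.toList.length + 2) char str

-- ===== PORT B =====
-- Source B's own ADJACENT table: each value is the neighbor letters as one compact string
def kbB : PySem.Dict String String := PySem.Dict.ofList [
  ("a", "qwsz"), ("b", "vghn"), ("c", "xdfv"), ("d", "erfcxs"), ("e", "wsdr"),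
  ("f", "drtgvc"), ("g", "ftyhbv"), ("h", "gyujnb"), ("i", "ujko"), ("j", "huikmn"),
  ("k", "jiolm"), ("l", "kop"), ("m", "njk"), ("n", "bhjm"), ("o", "iklp"), ("p", "ol"),
  ("q", "aw"), ("r", "edft"), ("s", "awedxz"), ("t", "rfgy"), ("u", "yhji"),
  ("v", "cfgb"), ("w", "qase"), ("x", "zsdc"), ("y", "tghu"), ("z", "asx")]

-- inner 'for v in ADJACENT[u]' loop of Source B: v ranges over the CHARS of the neighbor
-- string; state is (seen, stack), pushed elements are the one-char strings
def bfsStep (tmp : String) (seen : PySem.Set String) (stack : List String) (adj : List Char) :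
    PySem.Set String × List String :=
  adj.foldl (fun st v =>
    if !(PySem.Set.contains st.1 (String.singleton v)) && PySem.Str.isIn (String.singleton v) tmp
    then (PySem.Set.add st.1 (String.singleton v), String.singleton v :: st.2) else st)
    (seen, stack)

-- Source B's 'while stack' loop; the stack is kept top-first (Python's stack.pop() pops the last
-- element; here the head is the top, pushes are cons).  Fuel 256 is a totality guard only:
-- the proof shows the loop always empties the stack before the fuel runs out.
def bfsLoop (tmp : String) : Nat → PySem.Set String → List String → PySem.Set String
  | 0, seen, _ => seen
  | _+1, seen, [] => seen
  | fuel+1, seen, u :: rest =>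
    let st := bfsStep tmp seen rest ((kbB.get? u).getD "").toList
    bfsLoop tmp fuel st.1 st.2

def thingy_alt (char : String) (str : String) : String :=
  let tmp := PySem.Str.replace str char ""
  if kbB.contains char then
    let seen := bfsLoop tmp 256 (PySem.Set.add PySem.Set.empty char) [char]
    String.ofList (tmp.toList.filter (fun ch => !(PySem.Set.contains seen (String.singleton ch))))
  else tmp

-- ===== PRECONDITION & SPEC =====
def Spec_thingy (char : String) (str : String) (out : String) : Prop := out = thingy_alt char str
instance (char : String) (str : String) (out : String) : Decidable (Spec_thingy char str out) := by unfold Spec_thingy; infer_instance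

-- ===== CLAIM (what is proved, stated in full; the proofs are below) =====
def Claim_equal_thingy : Prop := ∀ (char : String) (str : String), Dom_thingy char str → Spec_thingy char str (thingy char str)

-- ===== LEMMAS AND PROOFS =====

-- ---------- string bridges ----------
theorem singleton_toList (c : Char) : (String.singleton c).toList = [c] := by
  simp [String.singleton]

theorem eq_singleton_of_toList {v : String} {c : Char} (h : v.toList = [c]) :
    v = String.singleton c := by
  apply String.ext; rw [h, singleton_toList]

theorem singleton_inj {x y : Char} (h : String.singleton x = String.singleton y) : x = y := by
  have h2 := congrArg String.toList h
  rw [singleton_toList, singleton_toList] at h2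
  injection h2

theorem replace_go_single (c : Char) :
    ∀ (fuel : Nat) (l acc : List Char), l.length ≤ fuel →
      PySem.Chars.replace.go [c] [] fuel l acc = acc.reverse ++ l.filter (fun x => x ≠ c) := by
  intro fuel
  induction fuel with
  | zero =>
    intro l acc h
    have : l = [] := List.length_eq_zero_iff.mp (Nat.le_zero.mp h)
    subst this; simp [PySem.Chars.replace.go]
  | succ fuel ih =>
    intro l acc h
    cases l with
    | nil => simp [PySem.Chars.replace.go]
    | cons hd tl =>
      by_cases hc : c = hd
      · subst hc
        have hpre : List.isPrefixOf [c] (c :: tl) = true := by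
          simp [List.isPrefixOf]
        simp only [PySem.Chars.replace.go, hpre, if_true]
        rw [show List.drop [c].length (c :: tl) = tl by simp,
            show ([] : List Char).reverse ++ acc = acc by simp]
        rw [ih tl acc (by simpa using Nat.le_of_succ_le_succ h)]
        simp
      · have hpre : List.isPrefixOf [c] (hd :: tl) = false := by
          simp [List.isPrefixOf]; exact hc
        simp only [PySem.Chars.replace.go, hpre]
        rw [ih tl (hd :: acc) (by simpa using Nat.le_of_succ_le_succ h)]
        simp [Ne.symm hc]

theorem replace_single (v : String) (c : Char) (s : String) (h : v.toList = [c]) :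
    (PySem.Str.replace s v "").toList = s.toList.filter (fun x => x ≠ c) := by
  rw [PySem.Str.toList_replace, h]
  show PySem.Chars.replace s.toList [c] "".toList = _
  rw [PySem.Chars.replace]
  simp only [List.isEmpty_cons]
  exact replace_go_single c s.toList.length s.toList [] le_rfl

theorem isIn_single {v : String} {c : Char} (s : String) (h : v.toList = [c]) :
    (PySem.Str.isIn v s = true) ↔ c ∈ s.toList := by
  rw [PySem.Str.isIn_iff_infix, h]
  exact List.singleton_infix_iff c _

-- ---------- graph infrastructure ----------
def charOf (u : String) : Char := u.toList.headD 'a'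

theorem charOf_singleton (c : Char) : charOf (String.singleton c) = c := by
  simp [charOf]

theorem charOf_of_toList {u : String} {c : Char} (h : u.toList = [c]) : charOf u = c := by
  simp [charOf, h]

def adjOf (c : Char) : List Char :=
  ((keyboardA.get? (String.singleton c)).getD []).flatMap String.toList

inductive RchI (T : Char → Prop) (a : Char) : Char → Prop
  | refl : RchI T a a
  | step {u w : Char} : RchI T a u → w ∈ adjOf u → T w → RchI T a w

theorem RchI.mono {T T' : Char → Prop} {a x : Char} (h : RchI T a x)
    (hTT : ∀ y, T y → T' y) : RchI T' a x := by
  induction h with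
  | refl => exact .refl
  | step _ e ht ih => exact .step ih e (hTT _ ht)

theorem RchI.trans' {T : Char → Prop} {a b x : Char} (h1 : RchI T a b) (h2 : RchI T b x) :
    RchI T a x := by
  induction h2 with
  | refl => exact h1
  | step _ e ht ih => exact .step ih e ht

theorem RchI.dest {T : Char → Prop} {a x : Char} (h : RchI T a x) : x = a ∨ T x := by
  cases h with
  | refl => exact Or.inl rfl
  | step _ _ ht => exact Or.inr ht

theorem RchI.cons {T : Char → Prop} {a w x : Char} (hw : w ∈ adjOf a) (ht : T w)
    (h : RchI T w x) : RchI T a x :=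
  RchI.trans' (.step .refl hw ht) h

theorem RchI.restrict {T C : Char → Prop} {a x : Char} (h : RchI T a x)
    (hC : ∀ y w, C y → w ∈ adjOf y → T w → C w) :
    C x ∨ RchI (fun y => T y ∧ ¬ C y) a x := by
  induction h with
  | refl => exact Or.inr .refl
  | step _ e ht ih =>
    rcases ih with hc | hr
    · exact Or.inl (hC _ _ hc e ht)
    · rename_i u w _
      by_cases hcw : C w
      · exact Or.inl hcw
      · exact Or.inr (.step hr e ⟨ht, hcw⟩)

theorem RchI.head {T : Char → Prop} {a x : Char} (h : RchI T a x) (hself : a ∉ adjOf a) :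
    x = a ∨ ∃ w, w ∈ adjOf a ∧ T w ∧ w ≠ a ∧ RchI (fun y => T y ∧ y ≠ a) w x := by
  induction h with
  | refl => exact Or.inl rfl
  | step h1 e ht ih =>
    rename_i u w
    rcases ih with rfl | ⟨w0, hw0, htw0, hne, hr⟩
    · right
      refine ⟨w, e, ht, ?_, .refl⟩
      intro hwa; subst hwa; exact hself e
    · by_cases hwa : w = a
      · exact Or.inl hwa
      · exact Or.inr ⟨w0, hw0, htw0, hne, .step hr e ⟨ht, hwa⟩⟩

-- ---------- facts about the two literal tables ----------
theorem kb_facts : ∀ p ∈ keyboardA.items,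
    p.1.toList.length = 1 ∧ p.1 ∉ p.2 ∧ p.2.length ≤ 6 ∧
      ∀ a ∈ p.2, keyboardA.contains a = true ∧ a.toList.length = 1 := by decide

theorem kb_keys_len : keyboardA.keys.length = 26 := by decide

-- B's compact table carries exactly A's adjacency, key by key
set_option maxHeartbeats 2000000 in
theorem kbB_vals : ∀ p ∈ keyboardA.items,
    (((kbB.get? p.1).getD "").toList.map String.singleton) = p.2 := by decide

theorem kbB_keys : kbB.keys = keyboardA.keys := by decide

theorem toList_single_of_len {v : String} (h : v.toList.length = 1) : ∃ c, v.toList = [c] := by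
  cases hl : v.toList with
  | nil => rw [hl] at h; simp at h
  | cons a t =>
    rw [hl] at h; simp at h
    subst h
    exact ⟨a, rfl⟩

theorem key_spec {v : String} {adj : List String} (h : keyboardA.get? v = some adj) :
    (∃ c, v.toList = [c]) ∧ v ∉ adj ∧ adj.length ≤ 6 ∧
      ∀ a ∈ adj, keyboardA.contains a = true ∧ ∃ d, a.toList = [d] := by
  have hm := PySem.Dict.mem_items_of_get?_eq_some keyboardA h
  obtain ⟨h1, h2, h3, h4⟩ := kb_facts _ hm
  exact ⟨toList_single_of_len h1, h2, h3, fun a ha =>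
    ⟨(h4 a ha).1, toList_single_of_len (h4 a ha).2⟩⟩

set_option maxHeartbeats 2000000 in
theorem kbB_val_of_get? {v : String} {adj : List String} (h : keyboardA.get? v = some adj) :
    (((kbB.get? v).getD "").toList.map String.singleton) = adj :=
  kbB_vals _ (PySem.Dict.mem_items_of_get?_eq_some keyboardA h)

theorem contains_some {v : String} (h : keyboardA.contains v = true) :
    ∃ adj, keyboardA.get? v = some adj := by
  cases ho : keyboardA.get? v with
  | none =>
    rw [PySem.Dict.get?_eq_none_iff_not_mem_keys] at ho
    rw [PySem.Dict.contains_iff_mem_keys] at h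
    exact absurd h ho
  | some adj => exact ⟨adj, rfl⟩

theorem none_of_not_contains {v : String} (h : keyboardA.contains v = false) :
    keyboardA.get? v = none := by
  cases ho : keyboardA.get? v with
  | none => rfl
  | some adj =>
    have := PySem.Dict.mem_keys_of_mem_items keyboardA (PySem.Dict.mem_items_of_get?_eq_some keyboardA ho)
    rw [← PySem.Dict.contains_iff_mem_keys] at this
    rw [h] at this; cases this

theorem kbB_contains_eq (v : String) : kbB.contains v = keyboardA.contains v := by
  cases hA : keyboardA.contains v with
  | true =>
    have hm : v ∈ kbB.keys := by
      rw [kbB_keys]; rwa [PySem.Dict.contains_iff_mem_keys] at hA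
    exact (PySem.Dict.contains_iff_mem_keys kbB v).mpr hm
  | false =>
    cases hB : kbB.contains v with
    | false => rfl
    | true =>
      have hm : v ∈ keyboardA.keys := by
        rw [← kbB_keys]; rwa [PySem.Dict.contains_iff_mem_keys] at hB
      rw [← PySem.Dict.contains_iff_mem_keys, hA] at hm; cases hm

theorem mem_keys_of_contains {v : String} (h : keyboardA.contains v = true) :
    v ∈ keyboardA.keys := by
  rwa [PySem.Dict.contains_iff_mem_keys] at h

theorem adjOf_key {v : String} {adj : List String} {c : Char}
    (hv : v.toList = [c]) (h : keyboardA.get? v = some adj) :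
    adjOf c = adj.flatMap String.toList := by
  rw [adjOf, ← eq_singleton_of_toList hv, h]
  rfl

theorem mem_adjOf_key {v : String} {adj : List String} {c : Char}
    (hv : v.toList = [c]) (h : keyboardA.get? v = some adj)
    (hsing : ∀ a ∈ adj, ∃ d, a.toList = [d]) (w : Char) :
    w ∈ adjOf c ↔ ∃ a ∈ adj, a.toList = [w] := by
  rw [adjOf_key hv h, List.mem_flatMap]
  constructor
  · rintro ⟨a, ha, hw⟩
    obtain ⟨d, hd⟩ := hsing a ha
    rw [hd] at hw
    simp at hw
    exact ⟨a, ha, by rw [hd, hw]⟩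
  · rintro ⟨a, ha, hw⟩
    exact ⟨a, ha, by rw [hw]; simp⟩

theorem not_self_adjOf {v : String} {adj : List String} {c : Char}
    (hv : v.toList = [c]) (h : keyboardA.get? v = some adj)
    (hnm : v ∉ adj) (hsing : ∀ a ∈ adj, ∃ d, a.toList = [d]) : c ∉ adjOf c := by
  intro hc
  obtain ⟨a, ha, hac⟩ := (mem_adjOf_key hv h hsing c).mp hc
  have : a = v := by
    rw [eq_singleton_of_toList hac, eq_singleton_of_toList hv]
  exact hnm (this ▸ ha)

-- ---------- A's recursion = filter by reachability ----------
def MainP (f : Nat) : Prop := ∀ (v : String) (c : Char) (s : String),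
  v.toList = [c] → keyboardA.contains v = true →
  (s.toList.filter (fun x => x ≠ c)).length < f →
  ∃ q : Char → Bool, (thingyFuel f v s).toList = s.toList.filter q ∧
    ∀ x : Char, q x = true ↔ ¬ RchI (fun y => y ∈ s.toList) c x

def LoopP (f : Nat) : Prop := ∀ (vs : List String) (cur : String),
  (∀ a ∈ vs, keyboardA.contains a = true ∧ ∃ d, a.toList = [d]) →
  cur.toList.length ≤ f →
  ∃ q : Char → Bool,
    (vs.foldl (fun t a => if PySem.Str.isIn a t then thingyFuel f a t else t) cur).toList
      = cur.toList.filter q ∧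
    ∀ x : Char, q x = true ↔
      ¬ ∃ a ∈ vs, ∃ d : Char, a.toList = [d] ∧ d ∈ cur.toList ∧
          RchI (fun y => y ∈ cur.toList) d x

-- one sequential DFS call folded into the simultaneous "multi-source" removal set
theorem mr_step {S S' : List Char} {d : Char} {a : String}
    (hS' : ∀ y, y ∈ S' ↔ y ∈ S ∧ ¬ RchI (fun z => z ∈ S) d y)
    (hd : d ∈ S) (vs : List String) (hda : a.toList = [d]) (x : Char) :
    (¬ RchI (fun z => z ∈ S) d x ∧
      ¬ ∃ b ∈ vs, ∃ e : Char, b.toList = [e] ∧ e ∈ S' ∧ RchI (fun z => z ∈ S') e x) ↔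
    ¬ ∃ b ∈ a :: vs, ∃ e : Char, b.toList = [e] ∧ e ∈ S ∧ RchI (fun z => z ∈ S) e x := by
  constructor
  · rintro ⟨h1, h2⟩ ⟨b, hb, e, hbe, heS, hr⟩
    rcases List.mem_cons.mp hb with rfl | hb'
    · have hed : e = d := by
        rw [hda] at hbe; injection hbe with h1 _; exact h1.symm
      exact h1 (hed ▸ hr)
    · by_cases hCe : RchI (fun z => z ∈ S) d e
      · exact h1 (hCe.trans' hr)
      · have hres := hr.restrict (C := fun y => RchI (fun z => z ∈ S) d y)
          (fun y w hy hw hT => hy.step hw hT)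
        rcases hres with hCx | hr'
        · exact h1 hCx
        · exact h2 ⟨b, hb', e, hbe, (hS' e).mpr ⟨heS, hCe⟩,
            hr'.mono (fun y hy => (hS' y).mpr hy)⟩
  · intro h
    refine ⟨fun hC => h ⟨a, List.mem_cons_self .., d, hda, hd, hC⟩, ?_⟩
    rintro ⟨b, hb, e, hbe, heS', hr⟩
    exact h ⟨b, List.mem_cons_of_mem _ hb, e, hbe, ((hS' e).mp heS').1,
      hr.mono (fun y hy => ((hS' y).mp hy).1)⟩

theorem loopP_of_mainP {f : Nat} (hm : MainP f) : LoopP f := by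
  intro vs
  induction vs with
  | nil =>
    intro cur _ _
    refine ⟨fun _ => true, by simp, by simp⟩
  | cons a vs ih =>
    intro cur hks hlen
    obtain ⟨hka, d, hd⟩ := hks a (List.mem_cons_self ..)
    rw [List.foldl_cons]
    by_cases hin : d ∈ cur.toList
    · have hguard : PySem.Str.isIn a cur = true := (isIn_single cur hd).mpr hin
      rw [hguard]
      simp only [if_true]
      have hflen : (cur.toList.filter (fun x => x ≠ d)).length < f := by
        have h1 : (cur.toList.filter (fun x => x ≠ d)).length < cur.toList.length := by
          apply List.length_filter_lt_length_iff_exists.mpr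
          exact ⟨d, hin, by simp⟩
        omega
      obtain ⟨q1, he1, hq1⟩ := hm a d cur hd hka hflen
      have hlen' : (thingyFuel f a cur).toList.length ≤ f := by
        rw [he1]
        exact le_trans (List.length_filter_le _ _) hlen
      obtain ⟨q2, he2, hq2⟩ := ih (thingyFuel f a cur)
        (fun b hb => hks b (List.mem_cons_of_mem _ hb)) hlen'
      refine ⟨fun x => q1 x && q2 x, ?_, ?_⟩
      · rw [he2, he1, List.filter_filter]
        exact List.filter_congr fun x _ => Bool.and_comm _ _
      · intro x
        rw [Bool.and_eq_true, hq1 x, hq2 x, he1]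
        exact mr_step (S := cur.toList) (S' := cur.toList.filter q1)
          (fun y => by simp only [List.mem_filter, hq1 y])
          hin vs hd x
    · have hguard : PySem.Str.isIn a cur = false := by
        cases hg : PySem.Str.isIn a cur with
        | false => rfl
        | true => exact absurd ((isIn_single cur hd).mp hg) hin
      rw [hguard]
      simp only [Bool.false_eq_true, if_false]
      obtain ⟨q2, he2, hq2⟩ := ih cur (fun b hb => hks b (List.mem_cons_of_mem _ hb)) hlen
      refine ⟨q2, he2, fun x => ?_⟩
      rw [hq2 x]
      constructor
      · rintro h ⟨b, hb, e, hbe, heS, hr⟩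
        rcases List.mem_cons.mp hb with rfl | hb'
        · have hed : e = d := by
            rw [hd] at hbe; injection hbe with h1 _; exact h1.symm
          exact hin (hed ▸ heS)
        · exact h ⟨b, hb', e, hbe, heS, hr⟩
      · rintro h ⟨b, hb, e, hbe, heS, hr⟩
        exact h ⟨b, List.mem_cons_of_mem _ hb, e, hbe, heS, hr⟩

theorem main_unroll {v : String} {c : Char} {adj : List String} {S : List Char}
    (hv : v.toList = [c]) (hadj : keyboardA.get? v = some adj)
    (hnm : v ∉ adj) (hsing : ∀ a ∈ adj, ∃ d, a.toList = [d]) (x : Char) :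
    RchI (fun y => y ∈ S) c x ↔
      x = c ∨ ∃ a ∈ adj, ∃ d : Char, a.toList = [d] ∧ d ∈ S.filter (fun y => y ≠ c) ∧
        RchI (fun y => y ∈ S.filter (fun y => y ≠ c)) d x := by
  have hself : c ∉ adjOf c := not_self_adjOf hv hadj hnm hsing
  have hmemf : ∀ y : Char, y ∈ S.filter (fun y => y ≠ c) ↔ y ∈ S ∧ y ≠ c := by
    intro y; rw [List.mem_filter]; simp
  constructor
  · intro h
    rcases h.head hself with rfl | ⟨w, hw, hTw, hwc, hr⟩
    · exact Or.inl rfl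
    · right
      obtain ⟨a, ha, haw⟩ := (mem_adjOf_key hv hadj hsing w).mp hw
      exact ⟨a, ha, w, haw, (hmemf w).mpr ⟨hTw, hwc⟩,
        hr.mono (fun y hy => (hmemf y).mpr hy)⟩
  · rintro (rfl | ⟨a, ha, d, hd, hdS, hr⟩)
    · exact .refl
    · have hdS' := (hmemf d).mp hdS
      have hw : d ∈ adjOf c := (mem_adjOf_key hv hadj hsing d).mpr ⟨a, ha, hd⟩
      exact RchI.cons hw hdS'.1 (hr.mono (fun y hy => ((hmemf y).mp hy).1))

theorem mainP_succ {f : Nat} (hl : LoopP f) : MainP (f + 1) := by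
  intro v c s hv hkv hflen
  obtain ⟨adj, hadj⟩ := contains_some hkv
  obtain ⟨_, hnm, _, hsing⟩ := key_spec hadj
  have hsing2 : ∀ a ∈ adj, ∃ d, a.toList = [d] := fun a ha => (hsing a ha).2
  have hrepl := replace_single v c s hv
  have hunf : thingyFuel (f+1) v s =
      adj.foldl (fun t a => if PySem.Str.isIn a t then thingyFuel f a t else t)
        (PySem.Str.replace s v "") := by
    show (match keyboardA.get? v with
      | none => PySem.Str.replace s v ""
      | some adj =>
        (PySem.List.pyRange 0 ((adj.length : Int)) 1).foldl
          (fun cur i =>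
            if PySem.Str.isIn (PySem.List.pyGetD adj i "") cur then
              thingyFuel f (PySem.List.pyGetD adj i "") cur
            else cur) (PySem.Str.replace s v "")) = _
    rw [hadj]
    exact PySem.List.foldl_pyRange_zero_pyGetD adj ""
      (fun t a => if PySem.Str.isIn a t then thingyFuel f a t else t) _
  have hlen1 : (PySem.Str.replace s v "").toList.length ≤ f := by
    rw [hrepl]; omega
  obtain ⟨q2, he2, hq2⟩ := hl adj (PySem.Str.replace s v "") hsing hlen1
  refine ⟨fun x => (decide (x ≠ c)) && q2 x, ?_, ?_⟩
  · rw [hunf, he2, hrepl, List.filter_filter]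
    exact List.filter_congr fun x _ => Bool.and_comm _ _
  · intro x
    rw [Bool.and_eq_true, decide_eq_true_eq, hq2 x, hrepl,
      main_unroll (S := s.toList) hv hadj hnm hsing2 x]
    constructor
    · rintro ⟨h1, h2⟩ h
      rcases h with rfl | hmr
      · exact h1 rfl
      · exact h2 hmr
    · intro h
      exact ⟨fun hx => h (Or.inl hx), fun hmr => h (Or.inr hmr)⟩

theorem mainP_all : ∀ f, MainP f := by
  intro f
  induction f with
  | zero => intro v c s _ _ h; omega
  | succ f ih => exact mainP_succ (loopP_of_mainP ih)

-- ---------- B's stack search computes exactly the reachable set ----------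
-- string-level reading of the char fold in bfsStep (proof-side helper)
def bfsStepS (tmp : String) (seen : PySem.Set String) (stack : List String) (adj : List String) :
    PySem.Set String × List String :=
  adj.foldl (fun st v =>
    if !(PySem.Set.contains st.1 v) && PySem.Str.isIn v tmp then (PySem.Set.add st.1 v, v :: st.2) else st)
    (seen, stack)

theorem bfsStep_eq_bfsStepS (tmp : String) (seen : PySem.Set String) (stack : List String)
    (adj : List Char) :
    bfsStep tmp seen stack adj = bfsStepS tmp seen stack (adj.map String.singleton) := by
  rw [bfsStep, bfsStepS, List.foldl_map]

theorem bfsStep_spec (tmp : String) :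
    ∀ (adj : List String) (seen stack : List String), seen.Nodup →
    (∀ w ∈ seen, w ∈ (bfsStepS tmp seen stack adj).1) ∧
    (bfsStepS tmp seen stack adj).1.Nodup ∧
    (∀ w ∈ (bfsStepS tmp seen stack adj).1,
        w ∈ seen ∨ (w ∈ adj ∧ PySem.Str.isIn w tmp = true ∧ w ∈ (bfsStepS tmp seen stack adj).2)) ∧
    (∀ w ∈ (bfsStepS tmp seen stack adj).2,
        w ∈ stack ∨ (w ∈ adj ∧ PySem.Str.isIn w tmp = true ∧ w ∈ (bfsStepS tmp seen stack adj).1)) ∧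
    (∀ w ∈ stack, w ∈ (bfsStepS tmp seen stack adj).2) ∧
    ((bfsStepS tmp seen stack adj).2.length + seen.length
        = stack.length + (bfsStepS tmp seen stack adj).1.length) ∧
    ((bfsStepS tmp seen stack adj).1.length ≤ seen.length + adj.length) ∧
    (∀ w ∈ adj, PySem.Str.isIn w tmp = true → w ∈ (bfsStepS tmp seen stack adj).1) := by
  intro adj
  induction adj with
  | nil =>
    intro seen stack hnd
    refine ⟨fun w hw => hw, hnd, fun w hw => Or.inl hw, fun w hw => Or.inl hw,
      fun w hw => hw, by simp [bfsStepS], by simp [bfsStepS], by simp⟩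
  | cons a adj ih =>
    intro seen stack hnd
    by_cases hga : (!(PySem.Set.contains seen a) && PySem.Str.isIn a tmp) = true
    · -- a is pushed
      have hstep : bfsStepS tmp seen stack (a :: adj)
          = bfsStepS tmp (PySem.Set.add seen a) (a :: stack) adj := by
        show (List.foldl _ _ (a :: adj)) = _
        rw [List.foldl_cons]
        simp only [hga, if_true]
        rfl
      obtain ⟨hna, hia⟩ := Bool.and_eq_true .. ▸ hga
      have hnin : a ∉ seen := by
        intro hmem
        rw [Bool.not_eq_eq_eq_not, Bool.not_true] at hna
        rw [← PySem.Set.contains_iff seen a] at hmem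
        rw [hna] at hmem; cases hmem
      have hadd : PySem.Set.add seen a = seen ++ [a] := PySem.Set.add_of_not_mem hnin
      have hnd' : (PySem.Set.add seen a).Nodup := PySem.Set.nodup_add seen a hnd
      obtain ⟨g1, g2, g3, g4, g5, g6, g7, g8⟩ := ih (PySem.Set.add seen a) (a :: stack) hnd'
      rw [hstep]
      have hmemadd : ∀ w, w ∈ PySem.Set.add seen a ↔ w ∈ seen ∨ w = a := by
        intro w; rw [hadd]; simp
      refine ⟨?_, g2, ?_, ?_, ?_, ?_, ?_, ?_⟩
      · exact fun w hw => g1 w ((hmemadd w).mpr (Or.inl hw))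
      · intro w hw
        rcases g3 w hw with hw' | ⟨hw1, hw2, hw3⟩
        · rcases (hmemadd w).mp hw' with h | rfl
          · exact Or.inl h
          · exact Or.inr ⟨List.mem_cons_self .., hia,
              g5 w (List.mem_cons_self ..)⟩
        · exact Or.inr ⟨List.mem_cons_of_mem _ hw1, hw2, hw3⟩
      · intro w hw
        rcases g4 w hw with hw' | ⟨hw1, hw2, hw3⟩
        · rcases List.mem_cons.mp hw' with rfl | h
          · exact Or.inr ⟨List.mem_cons_self .., hia,
              g1 w ((hmemadd w).mpr (Or.inr rfl))⟩
          · exact Or.inl h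
        · exact Or.inr ⟨List.mem_cons_of_mem _ hw1, hw2, hw3⟩
      · exact fun w hw => g5 w (List.mem_cons_of_mem _ hw)
      · have hl1 : (PySem.Set.add seen a).length = seen.length + 1 := by
          rw [hadd]; simp
        simp only [List.length_cons] at g6 ⊢
        omega
      · have hl1 : (PySem.Set.add seen a).length = seen.length + 1 := by
          rw [hadd]; simp
        simp only [List.length_cons] at g7 ⊢
        omega
      · intro w hw hwin
        rcases List.mem_cons.mp hw with rfl | h
        · exact g1 w ((hmemadd w).mpr (Or.inr rfl))
        · exact g8 w h hwin
    · -- a is skipped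
      have hstep : bfsStepS tmp seen stack (a :: adj) = bfsStepS tmp seen stack adj := by
        show (List.foldl _ _ (a :: adj)) = _
        rw [List.foldl_cons]
        simp only [Bool.not_eq_true] at hga
        simp only [hga, Bool.false_eq_true, if_false]
        rfl
      obtain ⟨g1, g2, g3, g4, g5, g6, g7, g8⟩ := ih seen stack hnd
      rw [hstep]
      refine ⟨g1, g2, ?_, ?_, g5, g6, by simp only [List.length_cons]; omega, ?_⟩
      · intro w hw
        rcases g3 w hw with h | ⟨h1, h2, h3⟩
        · exact Or.inl h
        · exact Or.inr ⟨List.mem_cons_of_mem _ h1, h2, h3⟩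
      · intro w hw
        rcases g4 w hw with h | ⟨h1, h2, h3⟩
        · exact Or.inl h
        · exact Or.inr ⟨List.mem_cons_of_mem _ h1, h2, h3⟩
      · intro w hw hwin
        rcases List.mem_cons.mp hw with rfl | h
        · -- guard failed although isIn w tmp: so w was already seen
          have hc : PySem.Set.contains seen w = true := by
            cases hcc : PySem.Set.contains seen w with
            | true => rfl
            | false =>
              exfalso; apply hga
              rw [hcc, hwin]; rfl
          exact g1 w ((PySem.Set.contains_iff seen w).mp hc)
        · exact g8 w h hwin

theorem nodup_sub_len {α : Type} [DecidableEq α] {l L : List α} (h : l.Nodup) (hs : l ⊆ L) :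
    l.length ≤ L.length :=
  (h.subperm hs).length_le

theorem bfsLoop_spec (tmp : String) : ∀ (fuel : Nat) (seen stack : List String),
    (∀ u ∈ seen, keyboardA.contains u = true ∧ ∃ d, u.toList = [d]) →
    (∀ u ∈ stack, u ∈ seen) →
    seen.Nodup →
    (∀ u ∈ seen, u ∉ stack → ∀ e ∈ adjOf (charOf u), e ∈ tmp.toList →
        String.singleton e ∈ seen) →
    stack.length + 7 * (26 - seen.length) < fuel →
    (∀ w ∈ seen, w ∈ bfsLoop tmp fuel seen stack) ∧
    (∀ w ∈ bfsLoop tmp fuel seen stack, w ∈ seen ∨ ∃ u ∈ stack, ∃ e : Char,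
        w = String.singleton e ∧ e ∈ tmp.toList ∧
        RchI (fun y => y ∈ tmp.toList) (charOf u) e) ∧
    (∀ u ∈ bfsLoop tmp fuel seen stack, ∀ e ∈ adjOf (charOf u), e ∈ tmp.toList →
        String.singleton e ∈ bfsLoop tmp fuel seen stack) := by
  intro fuel
  induction fuel with
  | zero => intro seen stack _ _ _ _ hfuel; omega
  | succ fuel ih =>
    intro seen stack hkeys hsub hnd hclosed hfuel
    cases stack with
    | nil =>
      refine ⟨fun w hw => hw, fun w hw => Or.inl hw, ?_⟩
      intro u hu e he hel
      exact hclosed u hu (List.not_mem_nil) e he hel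
    | cons u rest =>
      obtain ⟨hku, du, hdu⟩ := hkeys u (hsub u (List.mem_cons_self ..))
      obtain ⟨adju, hadju⟩ := contains_some hku
      obtain ⟨_, hnmu, hlen6, hsingu⟩ := key_spec hadju
      have hsingu2 : ∀ a ∈ adju, ∃ d, a.toList = [d] := fun a ha => (hsingu a ha).2
      have hloopeq : bfsLoop tmp (fuel+1) seen (u :: rest)
          = bfsLoop tmp fuel (bfsStepS tmp seen rest adju).1 (bfsStepS tmp seen rest adju).2 := by
        show bfsLoop tmp fuel (bfsStep tmp seen rest ((kbB.get? u).getD "").toList).1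
              (bfsStep tmp seen rest ((kbB.get? u).getD "").toList).2 = _
        rw [bfsStep_eq_bfsStepS, kbB_val_of_get? hadju]
      obtain ⟨g1, g2, g3, g4, g5, g6, g7, g8⟩ := bfsStep_spec tmp adju seen rest hnd
      set st := bfsStepS tmp seen rest adju with hst
      -- facts feeding the induction hypothesis
      have hkeys' : ∀ w ∈ st.1, keyboardA.contains w = true ∧ ∃ d, w.toList = [d] := by
        intro w hw
        rcases g3 w hw with h | ⟨h1, _, _⟩
        · exact hkeys w h
        · exact ⟨(hsingu w h1).1, (hsingu w h1).2⟩
      have hsub' : ∀ w ∈ st.2, w ∈ st.1 := by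
        intro w hw
        rcases g4 w hw with h | ⟨_, _, h3⟩
        · exact g1 w (hsub w (List.mem_cons_of_mem _ h))
        · exact h3
      have hclosed' : ∀ w ∈ st.1, w ∉ st.2 → ∀ e ∈ adjOf (charOf w), e ∈ tmp.toList →
          String.singleton e ∈ st.1 := by
        intro w hw hwn e he hel
        rcases g3 w hw with hwseen | ⟨_, _, h3⟩
        · by_cases hwu : w = u
          · subst hwu
            rw [charOf_of_toList hdu] at he
            obtain ⟨b, hb, hbe⟩ := (mem_adjOf_key hdu hadju hsingu2 e).mp he
            have hbin : PySem.Str.isIn b tmp = true := (isIn_single tmp hbe).mpr hel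
            have := g8 b hb hbin
            rwa [eq_singleton_of_toList hbe] at this
          · by_cases hwrest : w ∈ rest
            · exact absurd (g5 w hwrest) hwn
            · have : w ∉ u :: rest := by
                intro hmem
                rcases List.mem_cons.mp hmem with h | h
                · exact hwu h
                · exact hwrest h
              exact g1 _ (hclosed w hwseen this e he hel)
        · exact absurd h3 hwn
      have hst1sub : st.1 ⊆ keyboardA.keys := by
        intro w hw
        exact mem_keys_of_contains (hkeys' w hw).1
      have hst1le : st.1.length ≤ 26 := by
        have := nodup_sub_len g2 hst1sub
        rw [kb_keys_len] at this
        exact this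
      have hseensub : seen.length ≤ st.1.length := nodup_sub_len hnd (fun w hw => g1 w hw)
      have hfuel' : st.2.length + 7 * (26 - st.1.length) < fuel := by
        simp only [List.length_cons] at hfuel
        omega
      obtain ⟨f1, f2, f3⟩ := ih st.1 st.2 hkeys' hsub' g2 hclosed' hfuel'
      rw [hloopeq]
      refine ⟨fun w hw => f1 w (g1 w hw), ?_, f3⟩
      intro w hw
      rcases f2 w hw with hw1 | ⟨u', hu', e, rfl, hel, hr⟩
      · rcases g3 w hw1 with h | ⟨h1, h2, _⟩
        · exact Or.inl h
        · right
          obtain ⟨dw, hdw⟩ := (hsingu w h1).2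
          refine ⟨u, List.mem_cons_self .., dw, eq_singleton_of_toList hdw,
            (isIn_single tmp hdw).mp h2, ?_⟩
          rw [charOf_of_toList hdu]
          exact RchI.refl.step ((mem_adjOf_key hdu hadju hsingu2 dw).mpr ⟨w, h1, hdw⟩)
            ((isIn_single tmp hdw).mp h2)
      · rcases g4 u' hu' with h | ⟨h1, h2, _⟩
        · exact Or.inr ⟨u', List.mem_cons_of_mem _ h, e, rfl, hel, hr⟩
        · right
          obtain ⟨d', hd'⟩ := (hsingu u' h1).2
          refine ⟨u, List.mem_cons_self .., e, rfl, hel, ?_⟩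
          rw [charOf_of_toList hdu]
          rw [charOf_of_toList hd'] at hr
          exact RchI.cons ((mem_adjOf_key hdu hadju hsingu2 d').mpr ⟨u', h1, hd'⟩)
            ((isIn_single tmp hd').mp h2) hr

theorem bfs_complete {tmp : String} {F : List String}
    (hcl : ∀ u ∈ F, ∀ e ∈ adjOf (charOf u), e ∈ tmp.toList → String.singleton e ∈ F)
    {c : Char} (hroot : String.singleton c ∈ F) :
    ∀ x, RchI (fun y => y ∈ tmp.toList) c x → String.singleton x ∈ F := by
  intro x h
  induction h with
  | refl => exact hroot
  | step _ e ht ih =>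
    exact hcl _ ih _ (by rwa [charOf_singleton]) ht

-- pointwise agreement of the two final filters
theorem final_iff {c : Char} (hself : c ∉ adjOf c) (S : List Char) (x : Char) :
    (¬ RchI (fun y => y ∈ S) c x) ↔
      (x ≠ c ∧ ¬ (x = c ∨ (x ∈ S.filter (fun y => y ≠ c) ∧
        RchI (fun y => y ∈ S.filter (fun y => y ≠ c)) c x))) := by
  have hmemf : ∀ y : Char, y ∈ S.filter (fun y => y ≠ c) ↔ y ∈ S ∧ y ≠ c := by
    intro y; rw [List.mem_filter]; simp
  constructor
  · intro h
    have hxc : x ≠ c := fun hx => h (hx ▸ RchI.refl)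
    refine ⟨hxc, ?_⟩
    rintro (hx | ⟨_, hr⟩)
    · exact hxc hx
    · exact h (hr.mono (fun y hy => ((hmemf y).mp hy).1))
  · rintro ⟨hxc, hnr⟩ hr
    rcases hr.head hself with rfl | ⟨w, hw, hTw, hwc, hr'⟩
    · exact hxc rfl
    · have hrf : RchI (fun y => y ∈ S.filter (fun y => y ≠ c)) w x :=
        hr'.mono (fun y hy => (hmemf y).mpr hy)
      have hwf : w ∈ S.filter (fun y => y ≠ c) := (hmemf w).mpr ⟨hTw, hwc⟩
      have hxf : x ∈ S.filter (fun y => y ≠ c) := by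
        rcases hrf.dest with rfl | h
        · exact hwf
        · exact h
      exact hnr (Or.inr ⟨hxf, RchI.cons hw hwf hrf⟩)

-- ===== VERDICT (by name: the statement is the Claim_ definition above) =====
set_option maxHeartbeats 2000000 in
theorem thingy_spec : Claim_equal_thingy := by
  unfold Claim_equal_thingy Spec_thingy
  intro char str _
  show thingyFuel (str.toList.length + 2) char str
      = (if kbB.contains char then
          String.ofList ((PySem.Str.replace str char "").toList.filter
            (fun ch => !(PySem.Set.contains
              (bfsLoop (PySem.Str.replace str char "") 256
                (PySem.Set.add PySem.Set.empty char) [char]) (String.singleton ch))))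
        else PySem.Str.replace str char "")
  rw [kbB_contains_eq]
  cases hk : keyboardA.contains char with
  | false =>
    have hnone := none_of_not_contains hk
    show thingyFuel (str.toList.length + 1 + 1) char str = _
    rw [thingyFuel]
    simp only [hnone, Bool.false_eq_true, if_false]
  | true =>
    simp only [if_true]
    obtain ⟨adj, hadj⟩ := contains_some hk
    obtain ⟨⟨c, hc⟩, hnm, _, hsing⟩ := key_spec hadj
    have hsing2 : ∀ a ∈ adj, ∃ d, a.toList = [d] := fun a ha => (hsing a ha).2
    have hself : c ∉ adjOf c := not_self_adjOf hc hadj hnm hsing2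
    obtain ⟨qA, heA, hqA⟩ := mainP_all (str.toList.length + 2) char c str hc hk
      (by have := List.length_filter_le (fun x => decide (x ≠ c)) str.toList; omega)
    have hrepl := replace_single char c str hc
    have hseen0 : PySem.Set.add PySem.Set.empty char = [char] := rfl
    have hchar : char = String.singleton c := eq_singleton_of_toList hc
    obtain ⟨hgrow, hsound, hcl⟩ := bfsLoop_spec (PySem.Str.replace str char "") 256
      [char] [char]
      (fun u hu => by
        rcases List.mem_cons.mp hu with rfl | h
        · exact ⟨hk, c, hc⟩
        · cases h)
      (fun u hu => hu)
      (List.nodup_cons.mpr ⟨List.not_mem_nil, List.nodup_nil⟩)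
      (fun u hu hnu => absurd hu hnu)
      (by norm_num)
    rw [hseen0]
    set F := bfsLoop (PySem.Str.replace str char "") 256 [char] [char] with hF
    have memF : ∀ x : Char, (String.singleton x ∈ F) ↔
        (x = c ∨ (x ∈ (PySem.Str.replace str char "").toList ∧
          RchI (fun y => y ∈ (PySem.Str.replace str char "").toList) c x)) := by
      intro x
      constructor
      · intro hx
        rcases hsound _ hx with hin | ⟨u, hu, e, hxe, hel, hr⟩
        · left
          rcases List.mem_cons.mp hin with h | h
          · exact singleton_inj (hchar ▸ h)
          · cases h
        · right
          rcases List.mem_cons.mp hu with rfl | h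
          · have hxe' : x = e := singleton_inj hxe
            subst hxe'
            rw [charOf_of_toList hc] at hr
            exact ⟨hel, hr⟩
          · cases h
      · rintro (rfl | ⟨hxl, hr⟩)
        · rw [← hchar]
          exact hgrow char (List.mem_cons_self ..)
        · refine bfs_complete hcl ?_ x hr
          rw [← hchar]
          exact hgrow char (List.mem_cons_self ..)
    apply String.ext
    rw [heA, String.toList_ofList, hrepl, List.filter_filter]
    apply List.filter_congr
    intro x _
    have hb : ∀ b1 b2 : Bool, (b1 = true ↔ b2 = true) → b1 = b2 := by
      intro b1 b2 h; cases b1 <;> cases b2 <;> simp_all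
    apply hb
    rw [hqA x, Bool.and_eq_true, decide_eq_true_eq, Bool.not_eq_true']
    have hcont : (PySem.Set.contains F (String.singleton x) = false) ↔
        ¬ String.singleton x ∈ F := by
      constructor
      · intro hcf hmem
        rw [(PySem.Set.contains_iff F _).mpr hmem] at hcf; cases hcf
      · intro hn
        cases hcc : PySem.Set.contains F (String.singleton x) with
        | false => rfl
        | true => exact absurd ((PySem.Set.contains_iff F _).mp hcc) hn
    rw [hcont, memF x, hrepl]
    have hfi := final_iff hself str.toList x
    tauto
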